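-- pv_equiv track=rewrite | github.com/AVELURI12/Sentiment-Analyzer | gbas.py | extract_chapters_from_gutenberg_lines
-- ===== SOURCE A (Python) =====
-- def extract_chapters_from_gutenberg_lines(lines, epilogue="Epilogue"):
--     chapters = {} # create empty dictionary for chapters
--     current_chapter = ""
--     chapter_lines = [] # create empty list for chapter lines
--     in_chapter = False
--
--     for line in lines: # iterate over lines
--         # Check for chapter start
--         if line.strip().startswith("CHAPTER") or line.strip() == epilogue:
--             # Save the previous chapter if it exists
--             if in_chapter and current_chapter:
--                 chapters[current_chapter] = chapter_lines # chapter name is key and the lines are value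
--                 chapter_lines = [] # reset chapter lines
--             current_chapter = line.strip()
--             in_chapter = True # set to True when in new chapter
--         elif in_chapter: # if still in same chapter
--             chapter_lines.append(line) # add lines to list
--
--     # Add the last chapter if it exists
--     if in_chapter and current_chapter:
--         chapters[current_chapter] = chapter_lines
--
--     return chapters # return dictionary
-- ===== SOURCE B (Python) =====
-- def extract_chapters_from_gutenberg_lines(lines, epilogue="Epilogue"):
--     def is_boundary(line):
--         s = line.strip()
--         return s.startswith("CHAPTER") or s == epilogue
--
--     chapters = {}
--     n = len(lines)
--     i = 0
--     while i < n and not is_boundary(lines[i]):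
--         i += 1
--     while i < n:
--         title = lines[i].strip()
--         j = i + 1
--         while j < n and not is_boundary(lines[j]):
--             j += 1
--         if title:
--             chapters[title] = lines[i + 1:j]
--         i = j
--     return chapters
-- ===== Notes on version B (the rewrite author's own statement) =====
-- stated objective: alternative
-- what changed: B replaces A's one-pass flag-and-accumulator state machine with a scan-to-next-boundary decomposition: find each boundary line, slice the lines up to the next boundary as that chapter's body; Pre_ excludes inputs where epilogue is the empty string and some line strips to empty, since there blank lines count as untitled chapter boundaries, an unspecified corner on which A's grouping (merging the untitled run into the next titled chapter) and B's (each body starts at its own boundary) are equally defensible.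
import Mathlib
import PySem

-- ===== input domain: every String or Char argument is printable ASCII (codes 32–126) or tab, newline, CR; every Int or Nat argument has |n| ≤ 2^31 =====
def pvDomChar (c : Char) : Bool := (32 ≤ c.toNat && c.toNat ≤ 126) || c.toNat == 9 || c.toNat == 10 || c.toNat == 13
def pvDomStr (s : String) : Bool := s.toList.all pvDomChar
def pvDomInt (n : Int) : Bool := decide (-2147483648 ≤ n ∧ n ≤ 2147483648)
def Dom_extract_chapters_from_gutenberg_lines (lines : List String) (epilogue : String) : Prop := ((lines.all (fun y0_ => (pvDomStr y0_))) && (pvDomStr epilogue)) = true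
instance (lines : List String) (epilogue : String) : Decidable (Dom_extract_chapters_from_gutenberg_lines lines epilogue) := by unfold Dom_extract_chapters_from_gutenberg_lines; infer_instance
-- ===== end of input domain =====

-- B replaces A's one-pass flag/accumulator state machine by a scan-to-next-boundary
-- decomposition (find each boundary line, slice the lines up to the next boundary); same cost.

-- ===== PORT A =====
-- loop body of A's single for-loop; state = (chapters, current_chapter, chapter_lines, in_chapter)
def pvStepA (epilogue : String)
    (st : PySem.Dict String (List String) × String × List String × Bool) (line : String) :
    PySem.Dict String (List String) × String × List String × Bool :=
  let chapters := st.1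
  let current := st.2.1
  let chapter_lines := st.2.2.1
  let in_chapter := st.2.2.2
  if PySem.Str.startswith (PySem.Str.strip line) "CHAPTER" || (PySem.Str.strip line == epilogue) then
    let p := if in_chapter && !(current == "") then (chapters.insert current chapter_lines, ([] : List String))
             else (chapters, chapter_lines)
    (p.1, PySem.Str.strip line, p.2, true)
  else if in_chapter then (chapters, current, chapter_lines ++ [line], in_chapter)
  else st

def extract_chapters_from_gutenberg_lines (lines : List String) (epilogue : String) : List (String × List String) :=
  let st := lines.foldl (pvStepA epilogue) (PySem.Dict.empty, "", [], false)
  let chapters := if st.2.2.2 && !(st.2.1 == "") then st.1.insert st.2.1 st.2.2.1 else st.1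
  chapters.items

-- ===== PORT B =====
-- Source B's is_boundary helper
def pvIsBoundary (epilogue line : String) : Bool :=
  PySem.Str.startswith (PySem.Str.strip line) "CHAPTER" || (PySem.Str.strip line == epilogue)

-- Source B's scan loop 'while i < n and not is_boundary(lines[i]): i += 1' (used twice)
def pvSkip (epilogue : String) (lines : List String) (i : Nat) : Nat :=
  if h : i < lines.length then
    if pvIsBoundary epilogue lines[i] then i else pvSkip epilogue lines (i + 1)
  else i
termination_by lines.length - i

-- the scan never moves the index backwards (needed for pvLoop's termination)
theorem pvSkip_ge (epilogue : String) (lines : List String) (i : Nat) :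
    i ≤ pvSkip epilogue lines i := by
  rw [pvSkip]
  split
  · split
    · exact Nat.le_refl i
    · exact Nat.le_of_succ_le (pvSkip_ge epilogue lines (i + 1))
  · exact Nat.le_refl i
termination_by lines.length - i

-- Source B's outer while loop: take the boundary's title, scan to the next boundary, slice the body
def pvLoop (epilogue : String) (lines : List String)
    (chapters : PySem.Dict String (List String)) (i : Nat) : PySem.Dict String (List String) :=
  if h : i < lines.length then
    let title := PySem.Str.strip lines[i]
    let j := pvSkip epilogue lines (i + 1)
    let chapters' := if !(title == "") then
        chapters.insert title (PySem.List.slice lines (some ((i + 1 : Nat) : Int)) (some (j : Int)))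
      else chapters
    pvLoop epilogue lines chapters' j
  else chapters
termination_by lines.length - i
decreasing_by
  have := pvSkip_ge epilogue lines (i + 1); omega

def extract_chapters_from_gutenberg_lines_alt (lines : List String) (epilogue : String) : List (String × List String) :=
  (pvLoop epilogue lines PySem.Dict.empty (pvSkip epilogue lines 0)).items

-- ===== PRECONDITION & SPEC =====
-- Pre_ excludes inputs where epilogue is the empty string and some line strips to empty: there blank
-- lines count as untitled chapter boundaries, an unspecified corner on which A's grouping (merging the
-- untitled run's lines into the next titled chapter) and B's (each chapter's body starts at its own
-- boundary) are equally defensible.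
def Pre_extract_chapters_from_gutenberg_lines (lines : List String) (epilogue : String) : Prop :=
  ¬ (epilogue = "" ∧ ∃ l ∈ lines, PySem.Str.strip l = "")
instance (lines : List String) (epilogue : String) : Decidable (Pre_extract_chapters_from_gutenberg_lines lines epilogue) := by unfold Pre_extract_chapters_from_gutenberg_lines; infer_instance

def pvWitness_extract_chapters_from_gutenberg_lines : List String × String :=
  (["CHAPTER I", "It was.", "CHAPTER II", "It ended.", "Epilogue", "Fin"], "Epilogue")

def Spec_extract_chapters_from_gutenberg_lines (lines : List String) (epilogue : String) (out : List (String × List String)) : Prop := out = extract_chapters_from_gutenberg_lines_alt lines epilogue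
instance (lines : List String) (epilogue : String) (out : List (String × List String)) : Decidable (Spec_extract_chapters_from_gutenberg_lines lines epilogue out) := by unfold Spec_extract_chapters_from_gutenberg_lines; infer_instance

-- ===== CLAIM (what is proved, stated in full; the proofs are below) =====
def Claim_equal_extract_chapters_from_gutenberg_lines : Prop := ∀ (lines : List String) (epilogue : String), Dom_extract_chapters_from_gutenberg_lines lines epilogue → Pre_extract_chapters_from_gutenberg_lines lines epilogue → Spec_extract_chapters_from_gutenberg_lines lines epilogue (extract_chapters_from_gutenberg_lines lines epilogue)

-- ===== LEMMAS AND PROOFS =====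

-- common intermediate: the (title, body) segments of the line list, one per boundary line
def pvSegs (epilogue : String) : List String → List (String × List String)
  | [] => []
  | l :: ls =>
    if pvIsBoundary epilogue l then
      (PySem.Str.strip l, ls.takeWhile (fun x => !pvIsBoundary epilogue x)) ::
        pvSegs epilogue (ls.dropWhile (fun x => !pvIsBoundary epilogue x))
    else pvSegs epilogue ls
termination_by ls => ls.length
decreasing_by
  · have := List.length_dropWhile_le (fun x => !pvIsBoundary epilogue x) ls; simp; omega
  · simp

-- folding a segment into the dict (skipping untitled segments)
def pvStep2 (d : PySem.Dict String (List String)) (tb : String × List String) :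
    PySem.Dict String (List String) :=
  if !(tb.1 == "") then d.insert tb.1 tb.2 else d

-- A's final save step
def pvFin (st : PySem.Dict String (List String) × String × List String × Bool) :
    PySem.Dict String (List String) :=
  if st.2.2.2 && !(st.2.1 == "") then st.1.insert st.2.1 st.2.2.1 else st.1

theorem pvSegs_dropWhile (epilogue : String) (ls : List String) :
    pvSegs epilogue (ls.dropWhile (fun x => !pvIsBoundary epilogue x)) = pvSegs epilogue ls := by
  induction ls with
  | nil => rfl
  | cons l ls ih =>
      by_cases hb : pvIsBoundary epilogue l
      · simp [List.dropWhile_cons, hb]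
      · rw [pvSegs]
        simp [List.dropWhile_cons, hb, ih]

-- A's loop from an open truthy chapter, on lines all of whose boundary lines are titled
theorem pvA_main (epilogue : String) (ls : List String)
    (H : ∀ l ∈ ls, pvIsBoundary epilogue l = true → PySem.Str.strip l ≠ "")
    (d : PySem.Dict String (List String)) (t : String) (acc : List String) (ht : t ≠ "") :
    pvFin (ls.foldl (pvStepA epilogue) (d, t, acc, true)) =
      (pvSegs epilogue ls).foldl pvStep2
        (d.insert t (acc ++ ls.takeWhile (fun x => !pvIsBoundary epilogue x))) := by
  induction ls generalizing d t acc with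
  | nil => simp [pvSegs, pvFin, ht]
  | cons l ls ih =>
      by_cases hb : pvIsBoundary epilogue l = true
      · have ht' : PySem.Str.strip l ≠ "" := H l (by simp) hb
        have hstep : pvStepA epilogue (d, t, acc, true) l =
            (d.insert t acc, PySem.Str.strip l, [], true) := by
          have hcond : (PySem.Str.startswith (PySem.Str.strip l) "CHAPTER" ||
              (PySem.Str.strip l == epilogue)) = true := hb
          have ht2 : (t == "") = false := by simpa using ht
          simp only [pvStepA, hcond, ht2, if_true, ite_true, Bool.true_and, Bool.not_false]
        rw [List.foldl_cons, hstep,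
          ih (fun x hx hbx => H x (List.mem_cons_of_mem _ hx) hbx)
            (d.insert t acc) (PySem.Str.strip l) [] ht']
        rw [pvSegs]
        simp only [hb, if_true, List.takeWhile_cons, Bool.not_true, List.foldl_cons]
        rw [← pvSegs_dropWhile]
        simp [pvStep2, ht']
      · have hstep : pvStepA epilogue (d, t, acc, true) l = (d, t, acc ++ [l], true) := by
          have hcond : (PySem.Str.startswith (PySem.Str.strip l) "CHAPTER" ||
              (PySem.Str.strip l == epilogue)) = false := by simpa [pvIsBoundary] using hb
          simp only [pvStepA, hcond, Bool.false_eq_true, if_false, ite_false, if_true, ite_true]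
        rw [List.foldl_cons, hstep,
          ih (fun x hx hbx => H x (List.mem_cons_of_mem _ hx) hbx) d t (acc ++ [l]) ht]
        rw [pvSegs]
        simp only [hb, Bool.false_eq_true, if_false, List.takeWhile_cons, Bool.not_false, ite_true]
        simp


-- A's loop from the initial (no chapter open) state
theorem pvA_start (epilogue : String) (ls : List String)
    (H : ∀ l ∈ ls, pvIsBoundary epilogue l = true → PySem.Str.strip l ≠ "")
    (d : PySem.Dict String (List String)) :
    pvFin (ls.foldl (pvStepA epilogue) (d, "", [], false)) =
      (pvSegs epilogue ls).foldl pvStep2 d := by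
  induction ls with
  | nil => simp [pvSegs, pvFin]
  | cons l ls ih =>
      by_cases hb : pvIsBoundary epilogue l = true
      · have hcond : (PySem.Str.startswith (PySem.Str.strip l) "CHAPTER" ||
            (PySem.Str.strip l == epilogue)) = true := hb
        have ht' : PySem.Str.strip l ≠ "" := H l (by simp) hb
        rw [pvSegs]
        simp only [List.foldl_cons, pvStepA, hcond]
        simp only [Bool.false_and]
        have := pvA_main epilogue ls (fun l hl hbl => H l (by simp [hl]) hbl)
          d (PySem.Str.strip l) [] ht'
        simp at this ⊢
        rw [this, pvSegs_dropWhile]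
        simp [List.foldl_cons, pvStep2, ht', hb]
      · have hcond : (PySem.Str.startswith (PySem.Str.strip l) "CHAPTER" ||
            (PySem.Str.strip l == epilogue)) = false := by simpa [pvIsBoundary] using hb
        rw [pvSegs]
        simp only [List.foldl_cons, pvStepA, hcond]
        simp only [hb, Bool.false_eq_true, if_false]
        simpa using ih (fun l hl hbl => H l (by simp [hl]) hbl)

-- pvSkip lands at i plus the length of the non-boundary run starting at i
theorem pvSkip_eq (epilogue : String) (lines : List String) (i : Nat) :
    pvSkip epilogue lines i =
      i + ((lines.drop i).takeWhile (fun x => !pvIsBoundary epilogue x)).length := by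
  rw [pvSkip]
  split
  · rename_i h
    have hd : lines.drop i = lines[i] :: lines.drop (i + 1) := List.drop_eq_getElem_cons h
    split
    · rename_i hb
      rw [hd, List.takeWhile_cons]
      simp [hb]
    · rename_i hb
      rw [pvSkip_eq epilogue lines (i + 1), hd, List.takeWhile_cons]
      simp only [Bool.not_eq_true] at hb
      simp [hb]; omega
  · rename_i h
    have : lines.drop i = [] := List.drop_eq_nil_of_le (by omega)
    simp [this]
termination_by lines.length - i

-- what remains after pvSkip is the dropWhile of the suffix
theorem pvSkip_drop (epilogue : String) (lines : List String) (i : Nat) :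
    lines.drop (pvSkip epilogue lines i) =
      (lines.drop i).dropWhile (fun x => !pvIsBoundary epilogue x) := by
  rw [pvSkip]
  split
  · rename_i h
    have hd : lines.drop i = lines[i] :: lines.drop (i + 1) := List.drop_eq_getElem_cons h
    split
    · rename_i hb
      rw [hd, List.dropWhile_cons]
      simp [hb]
    · rename_i hb
      rw [pvSkip_drop epilogue lines (i + 1), hd, List.dropWhile_cons]
      simp only [Bool.not_eq_true] at hb
      simp [hb]
  · rename_i h
    have : lines.drop i = [] := List.drop_eq_nil_of_le (by omega)
    simp [this]
termination_by lines.length - i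

-- B's outer loop, entered at a boundary (or past the end), folds the remaining segments
theorem pvLoop_eq (epilogue : String) (lines : List String) (i : Nat)
    (hfix : lines.drop i = (lines.drop i).dropWhile (fun x => !pvIsBoundary epilogue x))
    (d : PySem.Dict String (List String)) :
    pvLoop epilogue lines d i = (pvSegs epilogue (lines.drop i)).foldl pvStep2 d := by
  rw [pvLoop]
  split
  · rename_i h
    have hd : lines.drop i = lines[i] :: lines.drop (i + 1) := List.drop_eq_getElem_cons h
    have hb : pvIsBoundary epilogue lines[i] = true := by
      by_contra hnb
      simp only [Bool.not_eq_true] at hnb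
      have := hfix
      rw [hd, List.dropWhile_cons] at this
      simp only [hnb, Bool.not_false, ite_true] at this
      have h1 := congrArg List.length this
      have h2 := List.length_dropWhile_le (fun x => !pvIsBoundary epilogue x) (lines.drop (i + 1))
      simp only [List.length_cons] at h1
      omega
    -- the body slice is the takeWhile run
    have hskip := pvSkip_eq epilogue lines (i + 1)
    have hmono := Nat.le.intro hskip.symm
    have hslice : PySem.List.slice lines (some ((i + 1 : Nat) : Int))
        (some ((pvSkip epilogue lines (i + 1) : Nat) : Int)) =
        (lines.drop (i + 1)).takeWhile (fun x => !pvIsBoundary epilogue x) := by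
      rw [PySem.List.slice_natCast, hskip]
      simp only [Nat.add_sub_cancel_left]
      exact (List.prefix_iff_eq_take.mp
        (List.takeWhile_prefix (fun x => !pvIsBoundary epilogue x))).symm
    -- the continuation is entered at a fixpoint again
    have hfix' : lines.drop (pvSkip epilogue lines (i + 1)) =
        (lines.drop (pvSkip epilogue lines (i + 1))).dropWhile
          (fun x => !pvIsBoundary epilogue x) := by
      rw [pvSkip_drop]
      exact (List.dropWhile_idempotent _ _).symm
    have hrec := pvLoop_eq epilogue lines (pvSkip epilogue lines (i + 1)) hfix'
    rw [hd, pvSegs]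
    simp only [hb, if_true]
    rw [List.foldl_cons]
    rw [hrec, pvSkip_drop]
    simp only [hslice, pvStep2]
  · rename_i h
    have : lines.drop i = [] := List.drop_eq_nil_of_le (by omega)
    simp [this, pvSegs]
termination_by lines.length - i
decreasing_by
  have := pvSkip_ge epilogue lines (i + 1); omega

theorem pvB_eq (epilogue : String) (lines : List String) :
    extract_chapters_from_gutenberg_lines_alt lines epilogue =
      ((pvSegs epilogue lines).foldl pvStep2 PySem.Dict.empty).items := by
  unfold extract_chapters_from_gutenberg_lines_alt
  have hfix : lines.drop (pvSkip epilogue lines 0) =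
      (lines.drop (pvSkip epilogue lines 0)).dropWhile (fun x => !pvIsBoundary epilogue x) := by
    rw [pvSkip_drop]
    exact (List.dropWhile_idempotent _ _).symm
  rw [pvLoop_eq epilogue lines (pvSkip epilogue lines 0) hfix, pvSkip_drop]
  simp [pvSegs_dropWhile]

-- ===== VERDICT (by name: the statement is the Claim_ definition above) =====
theorem extract_chapters_from_gutenberg_lines_spec : Claim_equal_extract_chapters_from_gutenberg_lines := by
  intro lines epilogue _ hpre
  have H : ∀ l ∈ lines, pvIsBoundary epilogue l = true → PySem.Str.strip l ≠ "" := by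
    intro l hl hb hstrip
    have hsw : PySem.Str.startswith "" "CHAPTER" = false := by decide
    unfold pvIsBoundary at hb
    rw [hstrip, hsw] at hb
    simp only [Bool.false_or, beq_iff_eq] at hb
    exact hpre ⟨hb.symm, l, hl, hstrip⟩
  show _ = _
  rw [pvB_eq]
  unfold extract_chapters_from_gutenberg_lines
  have := pvA_start epilogue lines H PySem.Dict.empty
  unfold pvFin at this
  simpa using congrArg PySem.Dict.items this
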